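-- pv_equiv track=rewrite | github.com/rouyerr/cs361 | study_board.py | separate_bitboards
-- ===== SOURCE A (Python) =====
-- def separate_bitboards(bitboard):
--     set_bits = []
--     while bitboard:
--         position = (bitboard & -bitboard).bit_length() - 1
--         set_bitboard = 1 << position
--         set_bits.append(set_bitboard)
--         bitboard &= bitboard - 1
--     return set_bits
-- ===== SOURCE B (Python) =====
-- def separate_bitboards(bitboard):
--     masks = []
--     mask = 1
--     while bitboard:
--         if bitboard & 1:
--             masks.append(mask)
--         bitboard >>= 1
--         mask <<= 1
--     return masks
-- ===== Notes on version B (the rewrite author's own statement) =====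
-- stated objective: alternative
-- what changed: B scans bit positions linearly (test bit 0, shift right, double a running mask) instead of isolating each set bit via bitboard & -bitboard and computing its bit_length.
import Mathlib
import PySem

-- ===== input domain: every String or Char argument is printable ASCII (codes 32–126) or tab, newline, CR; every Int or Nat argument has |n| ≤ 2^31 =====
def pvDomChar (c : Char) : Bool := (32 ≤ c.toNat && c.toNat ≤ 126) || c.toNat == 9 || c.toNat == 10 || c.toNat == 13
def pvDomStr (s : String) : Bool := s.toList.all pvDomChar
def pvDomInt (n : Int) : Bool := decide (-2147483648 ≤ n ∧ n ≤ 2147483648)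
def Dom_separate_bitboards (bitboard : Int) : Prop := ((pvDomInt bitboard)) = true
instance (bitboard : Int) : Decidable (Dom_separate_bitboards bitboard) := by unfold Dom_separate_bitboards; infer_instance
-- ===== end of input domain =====

-- B replaces A's set-bit isolation (bitboard & -bitboard, bit_length) by a linear low-to-high
-- bit scan with a running mask; alternative decomposition, same results.


-- ===== PORT A =====
-- Python's `while bitboard:` never exits for negative bitboard (excluded by Pre_);
-- the `≤ 0` guard only totalizes the port there, at 0 it is Python's loop exit.
-- For bitboard > 0, `position` is ≥ 0, so `.toNat` on it is exact.
def sepA_loop (bitboard : Int) (set_bits : List Int) : List Int :=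
  if bitboard ≤ 0 then set_bits
  else
    let position : Int := (PySem.Int.bitLength (PySem.Int.band bitboard (-bitboard)) : Int) - 1
    let set_bitboard : Int := (1 : Int) <<< position.toNat
    sepA_loop (PySem.Int.band bitboard (bitboard - 1)) (set_bits ++ [set_bitboard])
  termination_by bitboard.toNat
  decreasing_by
    rename_i h
    rw [PySem.Int.band_of_nonneg (by omega) (by omega)]
    have := Nat.and_le_right (n := bitboard.toNat) (m := (bitboard - 1).toNat)
    simp only [Int.toNat_natCast]
    omega

def separate_bitboards (bitboard : Int) : List Int := sepA_loop bitboard []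

-- ===== PORT B =====
def sepB_loop (bitboard mask : Int) (masks : List Int) : List Int :=
  if bitboard ≤ 0 then masks
  else
    let masks' := if PySem.Int.band bitboard 1 ≠ 0 then masks ++ [mask] else masks
    sepB_loop (bitboard >>> (1 : Nat)) (mask <<< (1 : Nat)) masks'
  termination_by bitboard.toNat
  decreasing_by
    rename_i h
    rw [Int.shiftRight_eq_div_pow]
    omega

def separate_bitboards_alt (bitboard : Int) : List Int := sepB_loop bitboard 1 []

-- ===== PRECONDITION & SPEC =====
-- Pre_ excludes negative bitboards: there Python's A (and B) never terminate
-- (`while bitboard:` with bitboard < 0 stays truthy forever), so A returns no value.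
def Pre_separate_bitboards (bitboard : Int) : Prop := 0 ≤ bitboard
instance (bitboard : Int) : Decidable (Pre_separate_bitboards bitboard) := by unfold Pre_separate_bitboards; infer_instance
def pvWitness_separate_bitboards : Int := 22

def Spec_separate_bitboards (bitboard : Int) (out : List Int) : Prop := out = separate_bitboards_alt bitboard
instance (bitboard : Int) (out : List Int) : Decidable (Spec_separate_bitboards bitboard out) := by unfold Spec_separate_bitboards; infer_instance

-- ===== CLAIM (what is proved, stated in full; the proofs are below) =====
def Claim_equal_separate_bitboards : Prop := ∀ (bitboard : Int), Dom_separate_bitboards bitboard → Pre_separate_bitboards bitboard → Spec_separate_bitboards bitboard (separate_bitboards bitboard)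

-- ===== LEMMAS AND PROOFS =====

-- number of trailing zero bits of a positive n
def pvTz (n : Nat) : Nat :=
  if n = 0 then 0 else if n % 2 = 1 then 0 else pvTz (n / 2) + 1
  termination_by n
  decreasing_by omega

theorem pvTz_pos (n : Nat) (h0 : n ≠ 0) (h2 : n % 2 = 0) : pvTz n = pvTz (n / 2) + 1 := by
  rw [pvTz]; simp [h0, h2]

theorem pvTz_odd (n : Nat) (h2 : n % 2 = 1) : pvTz n = 0 := by
  have h0 : n ≠ 0 := by omega
  rw [pvTz]; simp [h0, h2]

theorem pvTz_pow_le : ∀ n : Nat, 0 < n → 2 ^ pvTz n ≤ n := by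
  intro n
  induction n using Nat.strong_induction_on with
  | _ n ih =>
    intro hn
    rcases Nat.mod_two_eq_zero_or_one n with h2 | h2
    · rw [pvTz_pos n (by omega) h2]
      have := ih (n / 2) (by omega) (by omega)
      rw [pow_succ]
      omega
    · rw [pvTz_odd n h2]
      omega

-- n & (n-1) clears the lowest set bit
theorem land_pred : ∀ n : Nat, 0 < n → n &&& (n - 1) = n - 2 ^ pvTz n := by
  intro n
  induction n using Nat.strong_induction_on with
  | _ n ih =>
    intro hn
    rcases Nat.mod_two_eq_zero_or_one n with h2 | h2
    · -- even
      have ha : 0 < n / 2 := by omega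
      have h1 := Nat.land_bit false (n / 2) true (n / 2 - 1)
      simp only [Nat.bit_val, Bool.toNat_false, Bool.toNat_true, Bool.false_and,
        Nat.add_zero] at h1
      rw [show 2 * (n / 2 - 1) + 1 = n - 1 by omega, show 2 * (n / 2) = n by omega] at h1
      have hih := ih (n / 2) (by omega) ha
      have hle := pvTz_pow_le (n / 2) ha
      rw [pvTz_pos n (by omega) h2, pow_succ, h1]
      omega
    · -- odd
      have h1 := Nat.land_bit true ((n - 1) / 2) false ((n - 1) / 2)
      simp only [Nat.bit_val, Bool.toNat_false, Bool.toNat_true, Bool.and_false,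
        Nat.add_zero, Nat.and_self] at h1
      rw [show 2 * ((n - 1) / 2) + 1 = n by omega, show 2 * ((n - 1) / 2) = n - 1 by omega] at h1
      rw [pvTz_odd n h2, h1]
      omega

theorem bitLength_pow (t : Nat) : PySem.Int.bitLength ((2 ^ t : Nat) : Int) = t + 1 := by
  induction t with
  | zero => decide
  | succ t ih =>
    rw [PySem.Int.bitLength_natCast (by positivity)]
    have : 2 ^ (t + 1) / 2 = 2 ^ t := by omega
    rw [this, ih]

-- masks of the set bits of n, lowest first, bit i of n reported as 2^(k+i)
def nmasks (n k : Nat) : List Int :=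
  if n = 0 then [] else (if n % 2 = 1 then [(2 : Int) ^ k] else []) ++ nmasks (n / 2) (k + 1)
  termination_by n
  decreasing_by omega

theorem nmasks_eq (n k : Nat) :
    nmasks n k = if n = 0 then [] else (if n % 2 = 1 then [(2 : Int) ^ k] else []) ++ nmasks (n / 2) (k + 1) := by
  rw [nmasks]

theorem nmasks_zero (k : Nat) : nmasks 0 k = [] := by rw [nmasks_eq]; simp

theorem nmasks_key : ∀ n : Nat, ∀ k : Nat, 0 < n →
    nmasks n k = (2 : Int) ^ (k + pvTz n) :: nmasks (n &&& (n - 1)) k := by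
  intro n
  induction n using Nat.strong_induction_on with
  | _ n ih =>
    intro k hn
    rcases Nat.mod_two_eq_zero_or_one n with h2 | h2
    · -- even case
      have ha : 0 < n / 2 := by omega
      have hle := pvTz_pow_le (n / 2) ha
      have hclr : n &&& (n - 1) = 2 * ((n / 2) &&& ((n / 2) - 1)) := by
        rw [land_pred n hn, land_pred (n / 2) ha, pvTz_pos n (by omega) h2, pow_succ]
        omega
      rw [nmasks_eq n k, if_neg (by omega), if_neg (by omega), List.nil_append]
      rw [ih (n / 2) (by omega) (k + 1) ha]
      rw [pvTz_pos n (by omega) h2, hclr]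
      by_cases hc : (n / 2) &&& ((n / 2) - 1) = 0
      · rw [hc]
        simp only [Nat.mul_zero, nmasks_zero]
        congr 1
        ring
      · rw [nmasks_eq (2 * ((n / 2) &&& ((n / 2) - 1))) k]
        rw [if_neg (by omega), if_neg (by omega), List.nil_append]
        rw [show 2 * ((n / 2) &&& ((n / 2) - 1)) / 2 = (n / 2) &&& ((n / 2) - 1) by omega]
        congr 2
        ring
    · -- odd case
      have htz := pvTz_odd n h2
      have hclr : n &&& (n - 1) = n - 1 := by
        rw [land_pred n hn, htz]; omega
      rw [nmasks_eq n k, if_neg (by omega), if_pos h2, htz, hclr]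
      by_cases h1 : n = 1
      · subst h1; simp [nmasks_zero]
      · rw [nmasks_eq (n - 1) k, if_neg (by omega), if_neg (by omega), List.nil_append]
        rw [show (n - 1) / 2 = n / 2 by omega]
        simp

theorem sepA_loop_eq (b : Int) (acc : List Int) :
    sepA_loop b acc = if b ≤ 0 then acc
      else sepA_loop (PySem.Int.band b (b - 1))
        (acc ++ [(1 : Int) <<< ((PySem.Int.bitLength (PySem.Int.band b (-b)) : Int) - 1).toNat]) := by
  rw [sepA_loop]

theorem sepB_loop_eq (b m : Int) (acc : List Int) :
    sepB_loop b m acc = if b ≤ 0 then acc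
      else sepB_loop (b >>> (1 : Nat)) (m <<< (1 : Nat))
        (if PySem.Int.band b 1 ≠ 0 then acc ++ [m] else acc) := by
  rw [sepB_loop]

theorem sepA_loop_spec : ∀ n : Nat, ∀ acc : List Int,
    sepA_loop (n : Int) acc = acc ++ nmasks n 0 := by
  intro n
  induction n using Nat.strong_induction_on with
  | _ n ih =>
    intro acc
    by_cases hn : n = 0
    · subst hn; rw [sepA_loop_eq]; simp [nmasks_zero]
    · have hpos : 0 < n := by omega
      have hlp := land_pred n hpos
      have hle := pvTz_pow_le n hpos
      have hband : PySem.Int.band (n : Int) (-(n : Int)) = ((2 ^ pvTz n : Nat) : Int) := by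
        simp only [PySem.Int.band, if_pos (by positivity : (0:Int) ≤ (n:Int)),
          if_neg (by omega : ¬ (0:Int) ≤ -(n:Int))]
        rw [show (-(-(n : Int)) - 1).toNat = n - 1 by omega, Int.toNat_natCast, hlp,
          Nat.sub_sub_self hle]
      have hclr : PySem.Int.band (n : Int) ((n : Int) - 1) = ((n &&& (n - 1) : Nat) : Int) := by
        rw [PySem.Int.band_of_nonneg (by positivity) (by omega)]
        congr 2 ; omega
      rw [sepA_loop_eq, if_neg (by omega : ¬ (n : Int) ≤ 0), hband, hclr, bitLength_pow]
      rw [show ((((pvTz n + 1 : Nat)) : Int) - 1).toNat = pvTz n by omega]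
      rw [show (1 : Int) <<< pvTz n = (2 : Int) ^ pvTz n by rw [Int.shiftLeft_eq]; ring]
      rw [ih (n &&& (n - 1)) (by have := Nat.and_le_right (n := n) (m := n - 1); omega)]
      rw [nmasks_key n 0 hpos]
      simp

theorem sepB_loop_spec : ∀ n : Nat, ∀ k : Nat, ∀ acc : List Int,
    sepB_loop (n : Int) ((2 : Int) ^ k) acc = acc ++ nmasks n k := by
  intro n
  induction n using Nat.strong_induction_on with
  | _ n ih =>
    intro k acc
    by_cases hn : n = 0
    · subst hn; rw [sepB_loop_eq]; simp [nmasks_zero]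
    · have hband : PySem.Int.band (n : Int) 1 = ((n % 2 : Nat) : Int) := by
        rw [PySem.Int.band_one]
        exact_mod_cast PySem.Int.mod_natCast n 2
      have hshr : (n : Int) >>> (1 : Nat) = ((n / 2 : Nat) : Int) := by
        rw [Int.shiftRight_eq_div_pow]; push_cast; omega
      have hshl : (2 : Int) ^ k <<< (1 : Nat) = (2 : Int) ^ (k + 1) := by
        rw [Int.shiftLeft_eq]; ring
      rw [sepB_loop_eq, if_neg (by omega : ¬ (n : Int) ≤ 0), hband, hshr, hshl]
      rw [ih (n / 2) (by omega) (k + 1)]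
      rw [nmasks_eq n k, if_neg hn]
      rcases Nat.mod_two_eq_zero_or_one n with h2 | h2 <;> simp [h2]

-- ===== VERDICT (by name: the statement is the Claim_ definition above) =====
theorem separate_bitboards_spec : Claim_equal_separate_bitboards := by
  intro bitboard _ hpre
  unfold Pre_separate_bitboards at hpre
  unfold Spec_separate_bitboards separate_bitboards separate_bitboards_alt
  rw [show bitboard = (bitboard.toNat : Int) by omega, sepA_loop_spec bitboard.toNat []]
  rw [show (1 : Int) = (2 : Int) ^ 0 by norm_num, sepB_loop_spec bitboard.toNat 0 []]
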